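-- pv_equiv track=rewrite | github.com/oskkos/AOC2023 | src/day19.py | lines_to_workflows_and_ratings_strings
-- ===== SOURCE A (Python) =====
-- def lines_to_workflows_and_ratings_strings(
--     lines: list[str],
-- ) -> tuple[list[str], list[str]]:
--     """
--     Convert a list of lines into separate lists for workflows and ratings.
--
--     Args:
--         lines (list[str]): The input list of lines.
--
--     Returns:
--         tuple[list[str], list[str]]: A tuple containing two lists:
--             - workflows: A list of workflow strings.
--             - ratings: A list of rating strings.
--     """
--     workflows: list[str] = []
--     ratings: list[str] = []
--     current: list[str] = workflows
--     for line in lines: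
--         if not line:
--             current = ratings
--         else:
--             current.append(line)
--     return workflows, ratings
-- ===== SOURCE B (Python) =====
-- def lines_to_workflows_and_ratings_strings(
--     lines: list[str],
-- ) -> tuple[list[str], list[str]]:
--     try:
--         idx = lines.index('')
--     except ValueError:
--         return list(lines), []
--     return lines[:idx], [l for l in lines[idx + 1:] if l]
-- ===== Notes on version B (the rewrite author's own statement) =====
-- stated objective: simpler
-- what changed: Replaces the stateful current-target pointer walk with a split-point computation: find the first blank line's index once, then slice the prefix for workflows and filter blanks from the suffix for ratings.
import Mathlib
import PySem

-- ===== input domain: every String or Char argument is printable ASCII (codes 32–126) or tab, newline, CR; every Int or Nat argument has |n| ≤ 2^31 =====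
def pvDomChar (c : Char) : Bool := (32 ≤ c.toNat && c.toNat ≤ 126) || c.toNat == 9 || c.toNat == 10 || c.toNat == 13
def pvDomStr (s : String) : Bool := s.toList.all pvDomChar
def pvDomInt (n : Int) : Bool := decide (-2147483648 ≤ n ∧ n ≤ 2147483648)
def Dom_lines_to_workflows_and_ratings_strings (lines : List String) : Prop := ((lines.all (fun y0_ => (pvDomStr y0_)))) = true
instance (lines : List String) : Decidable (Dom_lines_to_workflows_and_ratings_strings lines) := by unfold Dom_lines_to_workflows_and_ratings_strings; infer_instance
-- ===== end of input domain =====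

-- B computes the split point (first blank line) once and slices/filters, instead of A's
-- stateful current-target-pointer walk; objective: simpler decomposition, same cost.

-- ===== PORT A =====
-- state: (workflows, ratings, current-is-ratings flag); 'current.append' via aliasing is
-- modelled by the Bool flag selecting which list to extend.
def lines_to_workflows_and_ratings_strings (lines : List String) : List String × List String :=
  let st := lines.foldl
    (fun (st : List String × List String × Bool) line =>
      if line = "" then (st.1, st.2.1, true)
      else if st.2.2 then (st.1, st.2.1 ++ [line], st.2.2)
      else (st.1 ++ [line], st.2.1, st.2.2))
    ([], [], false)
  (st.1, st.2.1)

-- ===== PORT B =====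
def lines_to_workflows_and_ratings_strings_alt (lines : List String) : List String × List String :=
  match PySem.List.index? lines "" with
  | none => (lines, [])
  | some idx =>
      (PySem.List.slice lines none (some (idx : Int)),
       (PySem.List.slice lines (some ((idx : Int) + 1)) none).filter (fun l => l != ""))

-- ===== PRECONDITION & SPEC =====
def Spec_lines_to_workflows_and_ratings_strings (lines : List String) (out : List String × List String) : Prop := out = lines_to_workflows_and_ratings_strings_alt lines
instance (lines : List String) (out : List String × List String) : Decidable (Spec_lines_to_workflows_and_ratings_strings lines out) := by unfold Spec_lines_to_workflows_and_ratings_strings; infer_instance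

-- ===== CLAIM (what is proved, stated in full; the proofs are below) =====
def Claim_equal_lines_to_workflows_and_ratings_strings : Prop := ∀ (lines : List String), Dom_lines_to_workflows_and_ratings_strings lines → Spec_lines_to_workflows_and_ratings_strings lines (lines_to_workflows_and_ratings_strings lines)

-- ===== LEMMAS AND PROOFS =====

-- A's loop body, named for the proofs.
def pvStepA (st : List String × List String × Bool) (line : String) :
    List String × List String × Bool :=
  if line = "" then (st.1, st.2.1, true)
  else if st.2.2 then (st.1, st.2.1 ++ [line], st.2.2)
  else (st.1 ++ [line], st.2.1, st.2.2)

theorem foldA_eq (lines : List String) (init : List String × List String × Bool) :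
    lines.foldl
      (fun (st : List String × List String × Bool) line =>
        if line = "" then (st.1, st.2.1, true)
        else if st.2.2 then (st.1, st.2.1 ++ [line], st.2.2)
        else (st.1 ++ [line], st.2.1, st.2.2)) init = lines.foldl pvStepA init := rfl

-- After the flag has flipped, A appends every non-blank line to ratings.
theorem foldA_true (t : List String) : ∀ (ws rs : List String),
    t.foldl pvStepA (ws, rs, true) = (ws, rs ++ t.filter (fun l => l != ""), true) := by
  induction t with
  | nil => intro ws rs; simp
  | cons l t ih =>
      intro ws rs
      rw [List.foldl_cons]
      by_cases hl : l = ""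
      · subst hl
        have h1 : pvStepA (ws, rs, true) "" = (ws, rs, true) := by simp [pvStepA]
        rw [h1, ih]
        simp
      · have h1 : pvStepA (ws, rs, true) l = (ws, rs ++ [l], true) := by
          simp [pvStepA, hl]
        rw [h1, ih]
        simp [hl]

-- Before the first blank line, A appends to workflows; characterise the whole run.
theorem foldA_false (t : List String) : ∀ (ws : List String),
    t.foldl pvStepA (ws, [], false) =
      ((ws ++ (lines_to_workflows_and_ratings_strings_alt t).1,
        (lines_to_workflows_and_ratings_strings_alt t).2,
        (PySem.List.index? t "").isSome)) := by
  induction t with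
  | nil =>
      intro ws
      simp [lines_to_workflows_and_ratings_strings_alt, PySem.List.index?]
  | cons l t ih =>
      intro ws
      by_cases hl : l = ""
      · subst hl
        rw [List.foldl_cons]
        have h1 : pvStepA (ws, [], false) "" = (ws, [], true) := by simp [pvStepA]
        rw [h1, foldA_true]
        have hidx : PySem.List.index? ("" :: t) "" = some 0 :=
          PySem.List.index?_cons_self "" t
        simp only [lines_to_workflows_and_ratings_strings_alt, hidx]
        have h0 : PySem.List.slice ("" :: t) none (some ((0 : Nat) : Int)) = [] := by
          rw [PySem.List.slice_to_natCast]; rfl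
        have h1' : PySem.List.slice ("" :: t) (some (((0 : Nat) : Int) + 1)) none = t := by
          have : (((0 : Nat) : Int) + 1) = ((1 : Nat) : Int) := by norm_num
          rw [this, PySem.List.slice_from_natCast]
          simp
        rw [h0, h1']
        simp
      · rw [List.foldl_cons]
        have h1 : pvStepA (ws, [], false) l = (ws ++ [l], [], false) := by
          simp [pvStepA, hl]
        rw [h1, ih]
        have hidx : PySem.List.index? (l :: t) "" =
            (PySem.List.index? t "").map (· + 1) :=
          PySem.List.index?_cons_of_ne t hl
        cases hc : PySem.List.index? t "" with
        | none =>
            simp only [lines_to_workflows_and_ratings_strings_alt, hidx, hc]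
            simp
        | some k =>
            simp only [lines_to_workflows_and_ratings_strings_alt, hidx, hc, Option.map_some]
            have hto : PySem.List.slice (l :: t) none (some ((k + 1 : Nat) : Int)) =
                l :: PySem.List.slice t none (some ((k : Nat) : Int)) := by
              rw [PySem.List.slice_to_natCast, PySem.List.slice_to_natCast,
                List.take_succ_cons]
            have hfrom : PySem.List.slice (l :: t) (some (((k + 1 : Nat) : Int) + 1)) none =
                PySem.List.slice t (some (((k : Nat) : Int) + 1)) none := by
              have h2 : (((k + 1 : Nat) : Int) + 1) = (((k + 2 : Nat) : Int)) := by push_cast; ring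
              have h3 : (((k : Nat) : Int) + 1) = (((k + 1 : Nat) : Int)) := by push_cast; ring
              rw [h2, h3, PySem.List.slice_from_natCast, PySem.List.slice_from_natCast,
                List.drop_succ_cons]
            rw [hto, hfrom]
            simp

-- ===== VERDICT (by name: the statement is the Claim_ definition above) =====
theorem lines_to_workflows_and_ratings_strings_spec : Claim_equal_lines_to_workflows_and_ratings_strings := by
  intro lines _
  unfold Spec_lines_to_workflows_and_ratings_strings
  unfold lines_to_workflows_and_ratings_strings
  dsimp only
  rw [foldA_eq, foldA_false lines []]
  simp
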